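-- pv_equiv track=rewrite | github.com/HyperAfnan/Smart-Classroom-Timetable-Scheduler | algorithm-microservice/src/services/fetch_details.py | build_subject_teachers
-- ===== SOURCE A (Python) =====
-- from typing import Any, cast
--
-- def build_subject_teachers(
--     subjects_list: list[dict[str, Any]],
--     teachers_list: list[dict[str, Any]],
--     assignments_list: list[dict[str, Any]],
-- ) -> dict[int, list[int]]:
--     """
--     Build subject_teachers mapping using subject indices as keys and
--     teacher indices (aligned with teachers_list) as values.
--     Returns: {subject_index: [teacher_index, ...]}
--     """
--     subj_id_to_index = {
--         subj["id"]: idx for idx, subj in enumerate(subjects_list) if "id" in subj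
--     }
--     teacher_id_to_index = {
--         t["id"]: idx for idx, t in enumerate(teachers_list) if "id" in t
--     }
--     mapping: dict[int, list[int]] = {idx: [] for idx in subj_id_to_index.values()}
--     for row in assignments_list:
--         # Row here from get_teacher_subject_assignments expects nested objects
--         subj = row.get("subject") or {}
--         teacher = row.get("teacher") or {}
--         sid = subj.get("id")
--         tid = teacher.get("id")
--
--         si = subj_id_to_index.get(sid)
--         ti = teacher_id_to_index.get(tid)
--
--         if si is not None and ti is not None:
--             mapping.setdefault(si, []).append(ti)
--
--     # Deduplicate and sort teachers per subject
--     return {si: sorted(set(tis)) for si, tis in mapping.items()}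
-- ===== SOURCE B (Python) =====
-- def build_subject_teachers(subjects_list, teachers_list, assignments_list):
--     subj_id_to_index = {
--         subj["id"]: idx for idx, subj in enumerate(subjects_list) if "id" in subj
--     }
--     teacher_id_to_index = {
--         t["id"]: idx for idx, t in enumerate(teachers_list) if "id" in t
--     }
--     pairs = []
--     for row in assignments_list:
--         subj = row.get("subject") or {}
--         teacher = row.get("teacher") or {}
--         si = subj_id_to_index.get(subj.get("id"))
--         ti = teacher_id_to_index.get(teacher.get("id"))
--         if si is not None and ti is not None:
--             pairs.append((si, ti))
--     return {
--         si: sorted({ti for s, ti in pairs if s == si})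
--         for si in subj_id_to_index.values()
--     }
-- ===== Notes on version B (the rewrite author's own statement) =====
-- stated objective: simpler
-- what changed: Replaces A's mutable dict-of-lists built with setdefault/append plus a final per-entry dedup pass by one flat pass collecting resolved (si, ti) pairs and a single dict comprehension that builds each subject's sorted deduplicated teacher list directly from that pair list.
import Mathlib
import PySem

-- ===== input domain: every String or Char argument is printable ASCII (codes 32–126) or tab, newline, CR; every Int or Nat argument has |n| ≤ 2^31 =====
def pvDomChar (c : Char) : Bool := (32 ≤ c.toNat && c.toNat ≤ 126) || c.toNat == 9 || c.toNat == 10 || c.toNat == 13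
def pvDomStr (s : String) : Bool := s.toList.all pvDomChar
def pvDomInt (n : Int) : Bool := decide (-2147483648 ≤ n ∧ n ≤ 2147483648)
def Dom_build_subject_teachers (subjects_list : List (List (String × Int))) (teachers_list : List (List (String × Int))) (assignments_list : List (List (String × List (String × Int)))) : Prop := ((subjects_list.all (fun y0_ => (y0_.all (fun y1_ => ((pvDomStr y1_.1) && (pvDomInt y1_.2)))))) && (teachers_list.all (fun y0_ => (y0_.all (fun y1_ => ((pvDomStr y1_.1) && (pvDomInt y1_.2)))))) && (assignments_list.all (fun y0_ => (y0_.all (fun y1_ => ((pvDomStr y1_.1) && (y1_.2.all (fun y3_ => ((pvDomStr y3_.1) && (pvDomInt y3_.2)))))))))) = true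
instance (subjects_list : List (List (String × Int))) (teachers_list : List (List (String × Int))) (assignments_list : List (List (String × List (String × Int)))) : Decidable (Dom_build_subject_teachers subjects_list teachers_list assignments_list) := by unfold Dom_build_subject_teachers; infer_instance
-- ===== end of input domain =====

-- B replaces A's mutable dict-of-lists accumulation (setdefault/append + final per-entry
-- dedup) by one flat pass collecting (si, ti) pairs and a single per-subject comprehension;
-- same return value, different decomposition (objective: simpler).

-- ===== PORT A =====
-- the two "{x['id']: idx for idx, x in enumerate(l) if 'id' in x}" comprehensions
def pvIdxById (l : List (List (String × Int))) : PySem.Dict Int Int :=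
  (PySem.List.enumerate l 0).foldl
    (fun d p =>
      match PySem.Dict.get? (PySem.Dict.mk p.2) "id" with
      | some v => d.insert v p.1
      | none => d)
    PySem.Dict.empty

-- "(row.get(key) or {}).get('id')" resolved through an index dict
-- (dict.get(None) is None, modelled by the bind)
def pvRowIdx (idx : PySem.Dict Int Int) (key : String)
    (row : List (String × List (String × Int))) : Option Int :=
  (PySem.Dict.get? (PySem.Dict.mk ((PySem.Dict.get? (PySem.Dict.mk row) key).getD [])) "id").bind
    (fun v => PySem.Dict.get? idx v)

def build_subject_teachers (subjects_list : List (List (String × Int))) (teachers_list : List (List (String × Int))) (assignments_list : List (List (String × List (String × Int)))) : List (Int × List Int) :=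
  let sidx := pvIdxById subjects_list
  let tidx := pvIdxById teachers_list
  -- mapping = {idx: [] for idx in subj_id_to_index.values()}
  let mapping0 : PySem.Dict Int (List Int) :=
    (PySem.Dict.values sidx).foldl (fun d i => d.insert i []) PySem.Dict.empty
  -- for row in assignments_list: … mapping.setdefault(si, []).append(ti)
  let mapping := assignments_list.foldl
    (fun m row =>
      match pvRowIdx sidx "subject" row, pvRowIdx tidx "teacher" row with
      | some si, some ti => m.modify si [] (· ++ [ti])
      | _, _ => m)
    mapping0
  -- return {si: sorted(set(tis)) for si, tis in mapping.items()}  (mapping's keys are unique)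
  mapping.items.map (fun p => (p.1, PySem.List.sorted (PySem.Set.ofList p.2) (fun x => x) false))

-- ===== PORT B =====
-- B-side copy of the index-dict comprehension (the same line of Python appears in Source B)
def pvAltIdxById (l : List (List (String × Int))) : PySem.Dict Int Int :=
  (PySem.List.enumerate l 0).foldl
    (fun d p =>
      if h : (PySem.Dict.get? (PySem.Dict.mk p.2) "id").isSome then
        d.insert ((PySem.Dict.get? (PySem.Dict.mk p.2) "id").get h) p.1
      else d)
    PySem.Dict.empty

-- B-side copy of "(row.get(key) or {}).get('id')" resolved through an index dict
def pvAltRowIdx (idx : PySem.Dict Int Int) (key : String)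
    (row : List (String × List (String × Int))) : Option Int :=
  (PySem.Dict.get? (PySem.Dict.mk ((PySem.Dict.get? (PySem.Dict.mk row) key).getD [])) "id").bind
    (fun v => PySem.Dict.get? idx v)

def build_subject_teachers_alt (subjects_list : List (List (String × Int))) (teachers_list : List (List (String × Int))) (assignments_list : List (List (String × List (String × Int)))) : List (Int × List Int) :=
  let sidx := pvAltIdxById subjects_list
  let tidx := pvAltIdxById teachers_list
  -- pairs = []; for row in assignments_list: … pairs.append((si, ti))
  let pairs := assignments_list.foldl
    (fun ps row =>
      match pvAltRowIdx sidx "subject" row with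
      | none => ps
      | some si =>
        match pvAltRowIdx tidx "teacher" row with
        | none => ps
        | some ti => ps ++ [(si, ti)])
    ([] : List (Int × Int))
  -- return {si: sorted({ti for s, ti in pairs if s == si}) for si in subj_id_to_index.values()}
  ((PySem.Dict.values sidx).foldl
    (fun d si => d.insert si
      (PySem.List.sorted
        (PySem.Set.ofList ((pairs.filter (fun q => q.1 == si)).map (fun q => q.2)))
        (fun x => x) false))
    PySem.Dict.empty).items

-- ===== PRECONDITION & SPEC =====
def Spec_build_subject_teachers (subjects_list : List (List (String × Int))) (teachers_list : List (List (String × Int))) (assignments_list : List (List (String × List (String × Int)))) (out : List (Int × List Int)) : Prop := out = build_subject_teachers_alt subjects_list teachers_list assignments_list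
instance (subjects_list : List (List (String × Int))) (teachers_list : List (List (String × Int))) (assignments_list : List (List (String × List (String × Int)))) (out : List (Int × List Int)) : Decidable (Spec_build_subject_teachers subjects_list teachers_list assignments_list out) := by unfold Spec_build_subject_teachers; infer_instance

-- ===== CLAIM (what is proved, stated in full; the proofs are below) =====
def Claim_equal_build_subject_teachers : Prop := ∀ (subjects_list : List (List (String × Int))) (teachers_list : List (List (String × Int))) (assignments_list : List (List (String × List (String × Int)))), Dom_build_subject_teachers subjects_list teachers_list assignments_list → Spec_build_subject_teachers subjects_list teachers_list assignments_list (build_subject_teachers subjects_list teachers_list assignments_list)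

-- ===== LEMMAS AND PROOFS =====

-- the B-side helpers are the same functions as the A-side ones (same Python lines)
theorem pvAltIdxById_eq : pvAltIdxById = pvIdxById := by
  funext l
  unfold pvAltIdxById pvIdxById
  congr 1
  funext d p
  cases h : PySem.Dict.get? (PySem.Dict.mk p.2) "id"
  · simp
  · simp
theorem pvAltRowIdx_eq : pvAltRowIdx = pvRowIdx := rfl

-- a row's resolved (si, ti) pair, if both lookups succeed
def pvResolve (sidx tidx : PySem.Dict Int Int)
    (row : List (String × List (String × Int))) : Option (Int × Int) :=
  (pvRowIdx sidx "subject" row).bind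
    (fun si => (pvRowIdx tidx "teacher" row).map (fun ti => (si, ti)))

theorem pv_loopA (sidx tidx : PySem.Dict Int Int)
    (as : List (List (String × List (String × Int)))) (m : PySem.Dict Int (List Int)) :
    as.foldl
      (fun m row =>
        match pvRowIdx sidx "subject" row, pvRowIdx tidx "teacher" row with
        | some si, some ti => m.modify si [] (· ++ [ti])
        | _, _ => m) m
    = (as.filterMap (pvResolve sidx tidx)).foldl
        (fun d p => d.modify p.1 [] (· ++ [p.2])) m := by
  induction as generalizing m with
  | nil => rfl
  | cons row as ih =>
    simp only [List.foldl_cons, List.filterMap_cons]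
    cases hs : pvRowIdx sidx "subject" row <;> cases ht : pvRowIdx tidx "teacher" row <;>
      simp [pvResolve, hs, ht, ih]

theorem pv_loopB (sidx tidx : PySem.Dict Int Int)
    (as : List (List (String × List (String × Int)))) (ps : List (Int × Int)) :
    as.foldl
      (fun ps row =>
        match pvRowIdx sidx "subject" row with
        | none => ps
        | some si =>
          match pvRowIdx tidx "teacher" row with
          | none => ps
          | some ti => ps ++ [(si, ti)]) ps
    = ps ++ as.filterMap (pvResolve sidx tidx) := by
  induction as generalizing ps with
  | nil => simp
  | cons row as ih =>
    simp only [List.foldl_cons, List.filterMap_cons]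
    cases hs : pvRowIdx sidx "subject" row <;> cases ht : pvRowIdx tidx "teacher" row <;>
      simp [pvResolve, hs, ht, ih]

-- a successfully resolved subject index is a value of the subject index dict
theorem pv_resolve_fst_mem (sidx tidx : PySem.Dict Int Int)
    (row : List (String × List (String × Int))) (q : Int × Int)
    (h : pvResolve sidx tidx row = some q) : q.1 ∈ PySem.Dict.values sidx := by
  unfold pvResolve at h
  cases hs : pvRowIdx sidx "subject" row with
  | none => simp [hs] at h
  | some si =>
    cases ht : pvRowIdx tidx "teacher" row with
    | none => simp [hs, ht] at h
    | some ti =>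
      simp only [hs, ht, Option.bind_some, Option.map_some, Option.some.injEq] at h
      subst h
      unfold pvRowIdx at hs
      cases hv : PySem.Dict.get? (PySem.Dict.mk ((PySem.Dict.get? (PySem.Dict.mk row) "subject").getD [])) "id" with
      | none => simp [hv] at hs
      | some v =>
        simp only [hv, Option.bind_some] at hs
        have := PySem.Dict.mem_items_of_get?_eq_some _ hs
        simp only [PySem.Dict.values]
        exact List.mem_map.mpr ⟨(v, si), this, rfl⟩

-- updating a set with elements it already has leaves it unchanged
theorem pv_update_of_subset (xs : List Int) (s : PySem.Set Int)
    (h : ∀ x ∈ xs, x ∈ s) : PySem.Set.update s xs = s := by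
  induction xs generalizing s with
  | nil => rfl
  | cons x xs ih =>
    rw [PySem.Set.update_cons, PySem.Set.add_of_mem (h x (by simp))]
    exact ih s (fun y hy => h y (by simp [hy]))

-- the seed fold {idx: [] …}: every key reads []
theorem pv_getD_seed (V : List Int) (d : PySem.Dict Int (List Int))
    (h : ∀ k, d.getD k [] = []) (k : Int) :
    (V.foldl (fun d i => d.insert i []) d).getD k [] = [] := by
  induction V generalizing d with
  | nil => exact h k
  | cons i V ih =>
    simp only [List.foldl_cons]
    exact ih _ (fun k' => by rw [PySem.Dict.getD_insert]; split <;> simp [h])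

-- keys after a single insert, as a set-add
theorem pv_keys_insert_eq_add {ν : Type} (d : PySem.Dict Int ν) (k : Int) (v : ν) :
    (d.insert k v).keys = PySem.Set.add d.keys k := by
  by_cases hx : d.contains k
  · rw [PySem.Dict.keys_insert_of_contains _ _ hx,
      PySem.Set.add_of_mem ((PySem.Dict.contains_iff_mem_keys _ _).mp hx)]
  · rw [PySem.Dict.keys_insert_of_not_contains _ _ (by simpa using hx),
      PySem.Set.add_of_not_mem (fun hmem => (by simpa using hx : ¬ _) ((PySem.Dict.contains_iff_mem_keys _ _).mpr hmem))]

-- keys of an insert-with-function fold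
theorem pv_keys_insert_fold (g : Int → List Int) (V : List Int) (d : PySem.Dict Int (List Int)) :
    (V.foldl (fun d si => d.insert si (g si)) d).keys = PySem.Set.update d.keys V := by
  induction V generalizing d with
  | nil => rfl
  | cons x V ih =>
    simp only [List.foldl_cons]
    rw [ih, PySem.Set.update_cons, pv_keys_insert_eq_add]

-- lookup after an insert-with-function fold
theorem pv_get?_insert_fold (g : Int → List Int) (V : List Int) (d : PySem.Dict Int (List Int)) (k : Int) :
    (V.foldl (fun d si => d.insert si (g si)) d).get? k
      = if k ∈ V then some (g k) else d.get? k := by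
  induction V generalizing d with
  | nil => simp
  | cons x V ih =>
    simp only [List.foldl_cons, ih, List.mem_cons]
    by_cases hV : k ∈ V
    · simp [hV]
    · by_cases hx : k = x
      · subst hx; simp [hV, PySem.Dict.get?_insert_self]
      · simp [hV, hx, PySem.Dict.get?_insert_of_ne _ _ hx]

-- a list of pairs whose second components are a function of the first IS the map over its keys
theorem pv_items_as_map {β γ : Type} (l : List (Int × β)) (g : Int → β) (f : β → γ)
    (h : ∀ p ∈ l, g p.1 = p.2) :
    l.map (fun p => (p.1, f p.2)) = (l.map Prod.fst).map (fun k => (k, f (g k))) := by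
  induction l with
  | nil => rfl
  | cons p l ih =>
    simp only [List.map_cons, List.cons.injEq]
    exact ⟨by rw [h p (by simp)], ih (fun q hq => h q (by simp [hq]))⟩

theorem pv_keys_modify_fold (P : List (Int × Int)) (d : PySem.Dict Int (List Int)) :
    (P.foldl (fun d p => d.modify p.1 [] (· ++ [p.2])) d).keys
      = PySem.Set.update d.keys (P.map Prod.fst) := by
  induction P generalizing d with
  | nil => rfl
  | cons p P ih =>
    simp only [List.foldl_cons, List.map_cons]
    rw [ih, PySem.Set.update_cons, PySem.Dict.keys_modify, pv_keys_insert_eq_add]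

-- ===== VERDICT (by name: the statement is the Claim_ definition above) =====
theorem build_subject_teachers_spec : Claim_equal_build_subject_teachers := by
  intro S T A _
  unfold Spec_build_subject_teachers build_subject_teachers build_subject_teachers_alt
  simp only [pvAltIdxById_eq, pvAltRowIdx_eq]  -- zeta-reduce the lets; B's helper copies are the same functions
  set sidx := pvIdxById S with hsidx
  set tidx := pvIdxById T with htidx
  set V := PySem.Dict.values sidx with hV
  set P := A.filterMap (pvResolve sidx tidx) with hP
  set G : Int → List Int := fun si =>
    PySem.List.sorted
      (PySem.Set.ofList ((P.filter (fun q => q.1 == si)).map (fun q => q.2)))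
      (fun x => x) false with hG
  -- rewrite both loops to their filterMap forms
  rw [pv_loopA sidx tidx A, pv_loopB sidx tidx A]
  set m0 : PySem.Dict Int (List Int) :=
    V.foldl (fun d i => d.insert i []) PySem.Dict.empty with hm0
  set m : PySem.Dict Int (List Int) :=
    P.foldl (fun d p => d.modify p.1 [] (· ++ [p.2])) m0 with hm
  -- A-side facts
  have hm0getD : ∀ k, m0.getD k [] = [] :=
    fun k => pv_getD_seed V PySem.Dict.empty (fun _ => PySem.Dict.getD_empty _ _) k
  have hmgetD : ∀ k, m.getD k [] = (P.filter (fun q => q.1 == k)).map (fun q => q.2) := by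
    intro k
    rw [hm, PySem.Dict.getD_foldl_modify_append, hm0getD]
    simp
  have hm0keys : m0.keys = PySem.Set.ofList V := by
    rw [hm0, pv_keys_insert_fold (fun _ => [])]
    rfl
  have hPmem : ∀ x ∈ P.map Prod.fst, x ∈ PySem.Set.ofList V := by
    intro x hx
    rcases List.mem_map.mp hx with ⟨q, hq, rfl⟩
    rcases List.mem_filterMap.mp (hP ▸ hq) with ⟨row, _, hres⟩
    exact (PySem.Set.mem_ofList _ _).mpr (pv_resolve_fst_mem sidx tidx row q hres)
  have hmkeys : m.keys = PySem.Set.ofList V := by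
    rw [hm, pv_keys_modify_fold, hm0keys, pv_update_of_subset _ _ hPmem]
  have hmnodup : m.keys.Nodup := by rw [hmkeys]; exact PySem.Set.nodup_ofList _
  -- A's result, as a map over its key list
  have hA : m.items.map
      (fun p => (p.1, PySem.List.sorted (PySem.Set.ofList p.2) (fun x => x) false))
      = (PySem.Set.ofList V).map (fun k => (k, G k)) := by
    rw [pv_items_as_map m.items (fun k => m.getD k [])
        (fun tis => PySem.List.sorted (PySem.Set.ofList tis) (fun x => x) false)
        (fun p hp => by obtain ⟨k, v⟩ := p; exact PySem.Dict.getD_of_mem_items _ hp hmnodup [])]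
    have : m.items.map Prod.fst = m.keys := rfl
    rw [this, hmkeys]
    exact List.map_congr_left (fun k _ => by rw [hmgetD k, hG])
  -- B's result, as a map over its key list
  set d1 : PySem.Dict Int (List Int) :=
    V.foldl (fun d si => d.insert si (G si)) PySem.Dict.empty with hd1
  have hd1keys : d1.keys = PySem.Set.ofList V := by
    rw [hd1, pv_keys_insert_fold G]
    rfl
  have hd1nodup : d1.keys.Nodup := by rw [hd1keys]; exact PySem.Set.nodup_ofList _
  have hd1get? : ∀ k ∈ V, d1.get? k = some (G k) := by
    intro k hk
    rw [hd1, pv_get?_insert_fold G]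
    simp [hk]
  have hB : d1.items = (PySem.Set.ofList V).map (fun k => (k, G k)) := by
    have hfun : ∀ p ∈ d1.items, (fun k => (d1.get? k).getD []) p.1 = p.2 := by
      intro p hp
      obtain ⟨k, v⟩ := p
      show (d1.get? k).getD [] = v
      rw [(PySem.Dict.get?_eq_some_iff_mem_items _ _ _ hd1nodup).mpr hp]
      rfl
    have := pv_items_as_map d1.items (fun k => (d1.get? k).getD []) id hfun
    simp only [id] at this
    have hid : d1.items.map (fun p : Int × List Int => (p.1, p.2)) = d1.items := by simp
    have hkeys : d1.items.map Prod.fst = d1.keys := rfl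
    rw [hid, hkeys, hd1keys] at this
    rw [this]
    refine List.map_congr_left (fun k hk => ?_)
    rw [hd1get? k ((PySem.Set.mem_ofList _ _).mp hk)]
    rfl
  exact hA.trans hB.symm
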